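-- pv_equiv track=rewrite | github.com/PhilHarnish/forge | src/origen/seven_segment.py | _parse
-- ===== SOURCE A (Python) =====
-- def _parse(lines):
--   segments = _initialize_segments(lines)
--   y = 0
--   for idx, line in enumerate(lines):
--     if idx % 2 == 1:  # Odd (vertical) lines.
--       start = 0
--     else:  # Even (horizontal) lines.
--       start = 1
--     x = start
--     for c in range(start, len(line), 2):
--       if line[c] != ' ':
--         segments[x] |= 1 << y
--       x += 2
--     y += idx % 2  # Increase by one every 2 rows.
--   return segments
--
-- def _initialize_segments(lines):
--   """Returns list([0, ...n]) for n = max length in lines."""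
--   if lines:
--     return [0] * max([len(line) for line in lines])
--   return []
-- ===== SOURCE B (Python) =====
-- def _parse(lines):
--   # Column-major rebuild: column x is fed by lines of the opposite parity,
--   # each contributing bit 1 << (idx // 2).
--   n = max((len(line) for line in lines), default=0)
--   out = []
--   for x in range(n):
--     v = 0
--     for idx, line in enumerate(lines):
--       if idx % 2 != x % 2 and x < len(line) and line[x] != ' ':
--         v |= 1 << (idx // 2)
--     out.append(v)
--   return out
-- ===== Notes on version B (the rewrite author's own statement) =====
-- stated objective: alternative
-- what changed: Replaced A's row-major scan with running (segments, x, y) state by a column-major pass that computes each output cell independently, deriving the bit index idx//2 and the contributing-line parity directly instead of accumulating them.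
import Mathlib
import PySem

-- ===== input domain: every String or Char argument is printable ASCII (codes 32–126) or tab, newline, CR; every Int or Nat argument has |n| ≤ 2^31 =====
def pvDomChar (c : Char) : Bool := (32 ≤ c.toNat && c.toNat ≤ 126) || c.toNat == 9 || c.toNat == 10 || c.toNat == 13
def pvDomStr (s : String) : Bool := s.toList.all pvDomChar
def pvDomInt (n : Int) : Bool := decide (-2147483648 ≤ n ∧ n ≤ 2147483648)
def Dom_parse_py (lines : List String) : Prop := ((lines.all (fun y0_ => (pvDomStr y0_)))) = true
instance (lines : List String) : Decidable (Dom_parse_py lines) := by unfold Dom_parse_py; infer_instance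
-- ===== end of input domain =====

-- B rebuilds the segment list column-major (one value per column, bit = idx//2 computed
-- directly) instead of A's row-major scan with accumulated (segments, x, y) state;
-- objective: alternative decomposition, same cost.

-- ===== PORT A =====
-- _initialize_segments(lines)
def initializeSegments (lines : List String) : List Int :=
  if lines ≠ [] then
    match PySem.List.max? (lines.map (fun line => PySem.Str.len line)) (fun v => v) with
    | some m => List.replicate m.toNat 0   -- [0] * m (m = max length ≥ 0)
    | none => []                           -- unreachable: lines ≠ []
  else []

def parse_py (lines : List String) : List Int :=
  let segments := initializeSegments lines
  ((PySem.List.enumerate lines 0).foldl (fun (st : List Int × Int) (p : Int × String) =>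
      let segments := st.1
      let y := st.2
      let idx := p.1
      let line := p.2
      let start : Int := if PySem.Int.mod idx 2 = 1 then 0 else 1
      let inner := (PySem.List.pyRange start (PySem.Str.len line) 2).foldl
        (fun (st2 : List Int × Int) (c : Int) =>
          let segments := st2.1
          let x := st2.2
          let segments :=
            if PySem.List.pyGetD line.toList c ' ' ≠ ' ' then    -- line[c]: c always in range
              PySem.List.pySetD segments x
                (PySem.Int.bor (PySem.List.pyGetD segments x 0) ((1 : Int) <<< y.toNat))  -- 1 << y, y ≥ 0 always
            else segments
          (segments, x + 2)) (segments, start)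
      (inner.1, y + PySem.Int.mod idx 2)) (segments, 0)).1

-- ===== PORT B =====
def parse_py_alt (lines : List String) : List Int :=
  let n := PySem.List.maxD (lines.map (fun line => PySem.Str.len line)) (fun v => v) 0
  (PySem.List.pyRange 0 n 1).map (fun x =>
    (PySem.List.enumerate lines 0).foldl (fun (v : Int) (p : Int × String) =>
      if PySem.Int.mod p.1 2 ≠ PySem.Int.mod x 2 ∧ x < PySem.Str.len p.2 ∧
         PySem.List.pyGetD p.2.toList x ' ' ≠ ' ' then   -- line[x]: guarded by x < len(line)
        PySem.Int.bor v ((1 : Int) <<< (PySem.Int.floordiv p.1 2).toNat)  -- 1 << (idx//2)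
      else v) 0)

-- ===== PRECONDITION & SPEC =====
def Spec_parse_py (lines : List String) (out : List Int) : Prop := out = parse_py_alt lines
instance (lines : List String) (out : List Int) : Decidable (Spec_parse_py lines out) := by unfold Spec_parse_py; infer_instance

-- ===== CLAIM (what is proved, stated in full; the proofs are below) =====
def Claim_equal_parse_py : Prop := ∀ (lines : List String), Dom_parse_py lines → Spec_parse_py lines (parse_py lines)

-- ===== LEMMAS AND PROOFS =====

-- scalar recursion computing B's column value: fold over lines with running index s
def colStep (x s : Nat) (l : List Char) (v : Int) : Int :=
  if s % 2 ≠ x % 2 ∧ x < l.length ∧ l.getD x ' ' ≠ ' ' then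
    PySem.Int.bor v ((1 : Int) <<< (s / 2)) else v

def colB (ls : List (List Char)) (s x : Nat) (v : Int) : Int :=
  match ls with
  | [] => v
  | l :: t => colB t (s + 1) x (colStep x s l v)

-- A's per-line update on the segment list, with the loop variable c itself as the index
def updA (line : List Char) (bit : Int) (sg : List Int) (c : Int) : List Int :=
  if PySem.List.pyGetD line c ' ' ≠ ' ' then
    PySem.List.pySetD sg c (PySem.Int.bor (PySem.List.pyGetD sg c 0) bit)
  else sg

theorem length_updA (line : List Char) (bit : Int) (sg : List Int) (c : Int) :
    (updA line bit sg c).length = sg.length := by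
  unfold updA; split <;> simp [PySem.List.length_pySetD]

theorem length_foldl_updA (line : List Char) (bit : Int) (cs : List Int) (sg : List Int) :
    (cs.foldl (updA line bit) sg).length = sg.length := by
  induction cs generalizing sg with
  | nil => rfl
  | cons c cs ih => simp [List.foldl_cons, ih, length_updA]

theorem foldl_updA_untouched (line : List Char) (bit : Int) (cs : List Int) (sg : List Int)
    (hc : ∀ c ∈ cs, 0 ≤ c) (j : Nat) (hj : (j : Int) ∉ cs) :
    PySem.List.pyGetD (cs.foldl (updA line bit) sg) (j : Int) 0 = PySem.List.pyGetD sg (j : Int) 0 := by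
  induction cs generalizing sg with
  | nil => rfl
  | cons c cs ih =>
    simp only [List.mem_cons, not_or] at hj
    rw [List.foldl_cons, ih _ (fun d hd => hc d (List.mem_cons_of_mem _ hd)) hj.2]
    unfold updA
    split
    · rw [PySem.List.pySetD_of_nonneg _ _ (hc c List.mem_cons_self)]
      have hne : ¬ (c.toNat = j) := by
        intro h; exact hj.1 (by have := hc c List.mem_cons_self; omega)
      simp [PySem.List.pyGetD_natCast, List.getD, List.getElem?_set_ne hne]
    · rfl

theorem foldl_updA_get (line : List Char) (bit : Int) (cs : List Int) (hnd : cs.Nodup)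
    (hc : ∀ c ∈ cs, 0 ≤ c) (sg : List Int) (j : Nat) (hjlen : j < sg.length) :
    PySem.List.pyGetD (cs.foldl (updA line bit) sg) (j : Int) 0 =
      if (j : Int) ∈ cs ∧ line.getD j ' ' ≠ ' ' then
        PySem.Int.bor (PySem.List.pyGetD sg (j : Int) 0) bit
      else PySem.List.pyGetD sg (j : Int) 0 := by
  induction cs generalizing sg with
  | nil => simp
  | cons c cs ih =>
    rw [List.foldl_cons]
    have hnd' := (List.nodup_cons.mp hnd).2
    have hc' : ∀ d ∈ cs, 0 ≤ d := fun d hd => hc d (List.mem_cons_of_mem _ hd)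
    by_cases hcj : c = (j : Int)
    · subst hcj
      have hnotin : (j : Int) ∉ cs := (List.nodup_cons.mp hnd).1
      rw [foldl_updA_untouched line bit cs _ hc' j hnotin]
      unfold updA
      simp only [PySem.List.pyGetD_natCast, PySem.List.pySetD_natCast]
      by_cases h : line.getD j ' ' ≠ ' '
      · rw [if_pos (by simpa [List.getD] using h), if_pos ⟨List.mem_cons_self, h⟩]
        simp [List.getD, hjlen]
      · simp only [ne_eq, not_not, List.getD] at h
        rw [if_neg (by simp [h]), if_neg (by simp [List.getD, h])]
    · have hstep : PySem.List.pyGetD (updA line bit sg c) (j : Int) 0 =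
          PySem.List.pyGetD sg (j : Int) 0 := by
        have hne : (j : Int) ∉ [c] := by
          simp only [List.mem_singleton]; exact fun h => hcj h.symm
        simpa using foldl_updA_untouched line bit [c] sg
          (by intro d hd; simp only [List.mem_singleton] at hd
              exact hd ▸ hc c List.mem_cons_self) j hne
      rw [ih hnd' hc' (updA line bit sg c) (by rw [length_updA]; exact hjlen), hstep]
      have hmem : ((j : Int) ∈ c :: cs) ↔ ((j : Int) ∈ cs) := by
        constructor
        · intro h
          rcases List.mem_cons.mp h with h | h
          · exact absurd h.symm hcj
          · exact h
        · exact List.mem_cons_of_mem _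
      by_cases hm : (j : Int) ∈ cs ∧ line.getD j ' ' ≠ ' '
      · rw [if_pos hm, if_pos ⟨hmem.mpr hm.1, hm.2⟩]
      · rw [if_neg hm, if_neg (fun hx => hm ⟨hmem.mp hx.1, hx.2⟩)]

theorem inner_sync (line : List Char) (bit : Int) :
    ∀ (m : Nat) (x0 : Int) (sg : List Int),
      (((List.range m).map (fun (k : Nat) => x0 + 2 * (k : Int))).foldl
          (fun (st2 : List Int × Int) (c : Int) =>
            (if PySem.List.pyGetD line c ' ' ≠ ' ' then
                PySem.List.pySetD st2.1 st2.2
                  (PySem.Int.bor (PySem.List.pyGetD st2.1 st2.2 0) bit)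
              else st2.1, st2.2 + 2)) (sg, x0)).1
      = ((List.range m).map (fun (k : Nat) => x0 + 2 * (k : Int))).foldl (updA line bit) sg := by
  intro m
  induction m with
  | zero => intro x0 sg; rfl
  | succ m ih =>
    intro x0 sg
    rw [List.range_succ_eq_map, List.map_cons, List.map_map, List.foldl_cons, List.foldl_cons]
    have hmap : (List.map ((fun (k : Nat) => x0 + 2 * (k : Int)) ∘ Nat.succ) (List.range m))
        = List.map (fun (k : Nat) => (x0 + 2) + 2 * (k : Int)) (List.range m) := by
      apply List.map_congr_left; intro k _
      simp only [Function.comp_apply]; push_cast; ring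
    rw [hmap]
    have h1 := ih (x0 + 2) (updA line bit sg x0)
    simp only [Nat.cast_zero, mul_zero, add_zero]
    have heq : (if PySem.List.pyGetD line x0 ' ' ≠ ' ' then
            PySem.List.pySetD sg x0 (PySem.Int.bor (PySem.List.pyGetD sg x0 0) bit)
          else sg) = updA line bit sg x0 := rfl
    rw [heq]
    exact h1

-- A's outer-loop body, named for the proofs (definitionally the lambda in parse_py)
def bodyA (st : List Int × Int) (p : Int × String) : List Int × Int :=
  let segments := st.1
  let y := st.2
  let idx := p.1
  let line := p.2
  let start : Int := if PySem.Int.mod idx 2 = 1 then 0 else 1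
  let inner := (PySem.List.pyRange start (PySem.Str.len line) 2).foldl
    (fun (st2 : List Int × Int) (c : Int) =>
      let segments := st2.1
      let x := st2.2
      let segments :=
        if PySem.List.pyGetD line.toList c ' ' ≠ ' ' then
          PySem.List.pySetD segments x
            (PySem.Int.bor (PySem.List.pyGetD segments x 0) ((1 : Int) <<< y.toNat))
        else segments
      (segments, x + 2)) (segments, start)
  (inner.1, y + PySem.Int.mod idx 2)

theorem parse_py_eq (lines : List String) :
    parse_py lines = ((PySem.List.enumerate lines 0).foldl bodyA (initializeSegments lines, 0)).1 := rfl

theorem bodyA_fst (sg : List Int) (y idx : Int) (line : String) :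
    (bodyA (sg, y) (idx, line)).1 =
      (PySem.List.pyRange (if PySem.Int.mod idx 2 = 1 then 0 else 1)
          (PySem.Str.len line) 2).foldl (updA line.toList ((1 : Int) <<< y.toNat)) sg := by
  unfold bodyA
  have := inner_sync line.toList ((1 : Int) <<< y.toNat)
  rw [PySem.List.pyRange_of_pos _ _ (by norm_num : (0:Int) < 2)]
  exact this _ _ sg

theorem pyRange_two_nodup (a b : Int) : (PySem.List.pyRange a b 2).Nodup := by
  rw [PySem.List.pyRange_of_pos _ _ (by norm_num : (0:Int) < 2)]
  exact List.nodup_range.map (fun p q h => by omega)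

theorem bodyA_fst_length (sg : List Int) (y idx : Int) (line : String) :
    (bodyA (sg, y) (idx, line)).1.length = sg.length := by
  rw [bodyA_fst]; exact length_foldl_updA _ _ _ _

theorem bodyA_fst_get (sg : List Int) (s : Nat) (line : String) (j : Nat) (hj : j < sg.length) :
    PySem.List.pyGetD (bodyA (sg, ((s / 2 : Nat) : Int)) ((s : Int), line)).1 (j : Int) 0 =
      colStep j s line.toList (PySem.List.pyGetD sg (j : Int) 0) := by
  rw [bodyA_fst]
  rw [foldl_updA_get _ _ _ (pyRange_two_nodup _ _)
      (fun c hc => by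
        rcases (PySem.List.mem_pyRange_iff_of_pos (by norm_num : (0:Int) < 2) c).mp hc with ⟨h1, _, _⟩
        split at h1 <;> omega)
      sg j hj]
  unfold colStep
  have hmem : ((j : Int) ∈ PySem.List.pyRange (if PySem.Int.mod (s : Int) 2 = 1 then 0 else 1)
      (PySem.Str.len line) 2) ↔ (s % 2 ≠ j % 2 ∧ j < line.toList.length) := by
    rw [PySem.List.mem_pyRange_iff_of_pos (by norm_num : (0:Int) < 2)]
    rw [PySem.Str.len_eq]
    have hmod : PySem.Int.mod (s : Int) 2 = ((s % 2 : Nat) : Int) := by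
      exact_mod_cast PySem.Int.mod_natCast s 2
    rw [hmod]
    have h2 : s % 2 = 0 ∨ s % 2 = 1 := by omega
    rcases h2 with h2 | h2 <;> rw [h2] <;> norm_num <;> omega
  simp only [Int.toNat_natCast]
  rw [if_congr (and_congr hmem Iff.rfl) rfl rfl]
  simp only [and_assoc]

theorem outer_loop (lines : List String) :
    ∀ (s : Nat) (sg : List Int),
      (((PySem.List.enumerate lines (s : Int)).foldl bodyA (sg, ((s / 2 : Nat) : Int))).1.length = sg.length)
      ∧ ∀ (j : Nat), j < sg.length →
          PySem.List.pyGetD ((PySem.List.enumerate lines (s : Int)).foldl bodyA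
              (sg, ((s / 2 : Nat) : Int))).1 (j : Int) 0
            = colB (lines.map String.toList) s j (PySem.List.pyGetD sg (j : Int) 0) := by
  induction lines with
  | nil => intro s sg; exact ⟨rfl, fun j hj => rfl⟩
  | cons l t ih =>
    intro s sg
    rw [PySem.List.enumerate_cons, List.foldl_cons]
    have hb : bodyA (sg, ((s / 2 : Nat) : Int)) ((s : Int), l)
        = ((bodyA (sg, ((s / 2 : Nat) : Int)) ((s : Int), l)).1, (((s + 1) / 2 : Nat) : Int)) := by
      have : (bodyA (sg, ((s / 2 : Nat) : Int)) ((s : Int), l)).2 = (((s + 1) / 2 : Nat) : Int) := by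
        unfold bodyA
        have hmod : PySem.Int.mod (s : Int) 2 = ((s % 2 : Nat) : Int) := by
          exact_mod_cast PySem.Int.mod_natCast s 2
        simp only [hmod]
        push_cast
        omega
      conv_lhs => rw [← Prod.mk.eta (p := bodyA _ _), this]
    have hcast : (s : Int) + 1 = ((s + 1 : Nat) : Int) := by push_cast; ring
    rw [hb, hcast]
    obtain ⟨ihlen, ihget⟩ := ih (s + 1) (bodyA (sg, ((s / 2 : Nat) : Int)) ((s : Int), l)).1
    constructor
    · rw [ihlen, bodyA_fst_length]
    · intro j hj
      rw [ihget j (by rw [bodyA_fst_length]; exact hj), bodyA_fst_get sg s l j hj]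
      rfl

-- B's inner fold computes colB
theorem alt_loop (x : Nat) :
    ∀ (lines : List String) (s : Nat) (v : Int),
      (PySem.List.enumerate lines (s : Int)).foldl (fun (v : Int) (p : Int × String) =>
        if PySem.Int.mod p.1 2 ≠ PySem.Int.mod ((x : Nat) : Int) 2 ∧ ((x : Nat) : Int) < PySem.Str.len p.2 ∧
           PySem.List.pyGetD p.2.toList ((x : Nat) : Int) ' ' ≠ ' ' then
          PySem.Int.bor v ((1 : Int) <<< (PySem.Int.floordiv p.1 2).toNat)
        else v) v
      = colB (lines.map String.toList) s x v := by
  intro lines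
  induction lines with
  | nil => intro s v; rfl
  | cons l t ih =>
    intro s v
    rw [PySem.List.enumerate_cons, List.foldl_cons]
    have hcast : (s : Int) + 1 = ((s + 1 : Nat) : Int) := by push_cast; ring
    rw [hcast, ih (s + 1)]
    show colB (t.map String.toList) (s + 1) x _ = colB ((l :: t).map String.toList) s x v
    rw [List.map_cons]
    show _ = colB (t.map String.toList) (s + 1) x (colStep x s l.toList v)
    congr 1
    unfold colStep
    have hmods : PySem.Int.mod (s : Int) 2 = ((s % 2 : Nat) : Int) := by
      exact_mod_cast PySem.Int.mod_natCast s 2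
    have hmodx : PySem.Int.mod (x : Int) 2 = ((x % 2 : Nat) : Int) := by
      exact_mod_cast PySem.Int.mod_natCast x 2
    have hdiv : PySem.Int.floordiv (s : Int) 2 = ((s / 2 : Nat) : Int) := by
      exact_mod_cast PySem.Int.floordiv_natCast s 2
    simp only [hmods, hmodx, hdiv, PySem.Str.len_eq, PySem.List.pyGetD_natCast, Int.toNat_natCast]
    have hcond : (¬((s % 2 : Nat) : Int) = ((x % 2 : Nat) : Int) ∧ (x : Int) < (l.toList.length : Int) ∧
        ¬l.toList.getD x ' ' = ' ') ↔ (¬s % 2 = x % 2 ∧ x < l.toList.length ∧ ¬l.toList.getD x ' ' = ' ') := by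
      constructor
      · rintro ⟨h1, h2, h3⟩; exact ⟨by exact_mod_cast h1, by exact_mod_cast h2, h3⟩
      · rintro ⟨h1, h2, h3⟩; exact ⟨by exact_mod_cast h1, by exact_mod_cast h2, h3⟩
    simp only [ne_eq]
    rw [if_congr hcond rfl rfl]

theorem replicate_getD (m j : Nat) : (List.replicate m (0 : Int)).getD j 0 = 0 := by
  rcases lt_or_ge j m with h | h
  · simp [List.getD, h]
  · simp [List.getD, List.getElem?_eq_none (show (List.replicate m (0:Int)).length ≤ j by simpa using h)]

theorem parse_py_spec0 : ∀ (lines : List String), parse_py lines = parse_py_alt lines := by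
  intro lines
  cases lines with
  | nil => rfl
  | cons l t =>
    obtain ⟨M, hM⟩ : ∃ M, PySem.List.max? ((l :: t).map (fun line => PySem.Str.len line))
        (fun v => v) = some M := by
      cases h : PySem.List.max? ((l :: t).map (fun line => PySem.Str.len line)) (fun v => v) with
      | none => rw [PySem.List.max?_eq_none_iff] at h; simp at h
      | some M => exact ⟨M, rfl⟩
    have hM0 : 0 ≤ M := by
      have hmem := PySem.List.max?_mem hM
      rw [List.mem_map] at hmem
      obtain ⟨a, _, ha⟩ := hmem
      rw [← ha, PySem.Str.len_eq]
      positivity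
    have hinit : initializeSegments (l :: t) = List.replicate M.toNat 0 := by
      unfold initializeSegments
      rw [if_pos (by simp), hM]
    have halt : parse_py_alt (l :: t) = (PySem.List.pyRange 0 M 1).map (fun x =>
        (PySem.List.enumerate (l :: t) 0).foldl (fun (v : Int) (p : Int × String) =>
          if PySem.Int.mod p.1 2 ≠ PySem.Int.mod x 2 ∧ x < PySem.Str.len p.2 ∧
             PySem.List.pyGetD p.2.toList x ' ' ≠ ' ' then
            PySem.Int.bor v ((1 : Int) <<< (PySem.Int.floordiv p.1 2).toNat)
          else v) 0) := by
      show (PySem.List.pyRange 0 (PySem.List.maxD ((l :: t).map (fun line => PySem.Str.len line))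
          (fun v => v) 0) 1).map _ = _
      rw [show PySem.List.maxD ((l :: t).map (fun line => PySem.Str.len line)) (fun v => v) 0 = M by
        unfold PySem.List.maxD; rw [hM]; rfl]
    obtain ⟨hlen, hget⟩ := outer_loop (l :: t) 0 (List.replicate M.toNat 0)
    simp only [show ((0 / 2 : Nat) : Int) = 0 from rfl] at hlen hget
    have hA : parse_py (l :: t) =
        ((PySem.List.enumerate (l :: t) 0).foldl bodyA (List.replicate M.toNat 0, 0)).1 := by
      rw [parse_py_eq, hinit]
    apply List.ext_getElem
    · rw [hA, hlen, halt, List.length_map, PySem.List.length_pyRange_one]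
      simp
    · intro j hj1 hj2
      have hjM : j < M.toNat := by
        rw [hA, hlen, List.length_replicate] at hj1; exact hj1
      have hAj : (parse_py (l :: t))[j] = colB ((l :: t).map String.toList) 0 j 0 := by
        have h1 : (parse_py (l :: t))[j] = (parse_py (l :: t)).getD j 0 := by
          rw [List.getD_eq_getElem _ _ hj1]
        rw [h1]
        have h2 := hget j (by simpa using hjM)
        rw [PySem.List.pyGetD_natCast, PySem.List.pyGetD_natCast, replicate_getD] at h2
        rw [hA]
        exact h2
      have hBj : (parse_py_alt (l :: t))[j] = colB ((l :: t).map String.toList) 0 j 0 := by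
        have h1 : (parse_py_alt (l :: t))[j] = (parse_py_alt (l :: t)).getD j 0 := by
          rw [List.getD_eq_getElem _ _ hj2]
        rw [h1, halt, List.getD_eq_getElem?_getD, List.getElem?_map]
        rw [show (PySem.List.pyRange 0 M 1)[j]? = some ((0 : Int) + (j : Int)) from by
          rw [PySem.List.getElem?_pyRange_one]; simp [hjM]]
        simp only [Option.map_some, Option.getD_some, zero_add]
        exact alt_loop j (l :: t) 0 0
      rw [hAj, hBj]

-- ===== VERDICT (by name: the statement is the Claim_ definition above) =====
theorem parse_py_spec : Claim_equal_parse_py := by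
  intro lines _
  exact parse_py_spec0 lines
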